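-- pv_equiv track=rewrite | github.com/Harsha-Vardhan-Tangudu/Design-Analysis-And-Algorithms-CODES | Sortings/INSERTION SORT.py | generate_worst_case_array
-- ===== SOURCE A (Python) =====
-- def generate_worst_case_array(size):
--     primitive_operations = 0  # Initialize a counter for primitive operations
--     arr = []  # Initialize an empty array
--
--     for i in range(size, 0, -1):  # Loop runs 'size' times - O(size) operations
--         primitive_operations += 1  # Increment operation count for the loop
--         arr.append(i)  # Append the value to the array - O(1) operation
--         primitive_operations += 1  # Increment operation count for arr.append
--
--     return arr, primitive_operations  # Return the generated array and the total count of primitive operations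
-- ===== SOURCE B (Python) =====
-- def generate_worst_case_array(size):
--     arr = list(range(size, 0, -1))
--     return arr, 2 * len(arr)
-- ===== Notes on version B (the rewrite author's own statement) =====
-- stated objective: faster
-- what changed: Replaces the counting loop by a direct list construction from range and computes the operation counter as a closed-form arithmetic expression on the array length.
import Mathlib
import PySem

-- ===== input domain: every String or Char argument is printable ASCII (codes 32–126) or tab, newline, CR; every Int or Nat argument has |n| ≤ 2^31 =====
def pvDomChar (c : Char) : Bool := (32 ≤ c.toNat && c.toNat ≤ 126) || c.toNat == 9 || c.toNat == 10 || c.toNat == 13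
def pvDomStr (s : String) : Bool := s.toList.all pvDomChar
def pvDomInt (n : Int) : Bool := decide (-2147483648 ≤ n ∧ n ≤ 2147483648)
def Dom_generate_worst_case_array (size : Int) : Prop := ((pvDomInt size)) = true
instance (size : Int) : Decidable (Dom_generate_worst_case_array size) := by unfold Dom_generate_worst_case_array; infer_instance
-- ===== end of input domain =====

-- B builds the descending array with range directly and computes the counter as 2*len(arr) (simpler, loop-free).


-- ===== PORT A =====
-- literal transliteration of A: loop over range(size,0,-1) accumulating (arr, primitive_operations)
def generate_worst_case_array (size : Int) : List Int × Int :=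
  (PySem.List.pyRange size 0 (-1)).foldl
    (fun (st : List Int × Int) i =>
      let p := st.2 + 1          -- primitive_operations += 1
      let a := st.1 ++ [i]       -- arr.append(i)
      (a, p + 1))                -- primitive_operations += 1
    ([], 0)

-- ===== PORT B =====
-- B: build the array directly from range and compute the counter in closed form
def generate_worst_case_array_alt (size : Int) : List Int × Int :=
  let arr := PySem.List.pyRange size 0 (-1)
  (arr, 2 * arr.length)

-- ===== PRECONDITION & SPEC =====
def Spec_generate_worst_case_array (size : Int) (out : List Int × Int) : Prop := out = generate_worst_case_array_alt size
instance (size : Int) (out : List Int × Int) : Decidable (Spec_generate_worst_case_array size out) := by unfold Spec_generate_worst_case_array; infer_instance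

-- ===== CLAIM (what is proved, stated in full; the proofs are below) =====
def Claim_equal_generate_worst_case_array : Prop := ∀ (size : Int), Dom_generate_worst_case_array size → Spec_generate_worst_case_array size (generate_worst_case_array size)

-- ===== LEMMAS AND PROOFS =====

-- ===== VERDICT (by name: the statement is the Claim_ definition above) =====
theorem gwca_foldl (l : List Int) (acc : List Int) (c : Int) :
    l.foldl (fun (st : List Int × Int) i =>
      let p := st.2 + 1
      let a := st.1 ++ [i]
      (a, p + 1)) (acc, c) = (acc ++ l, c + 2 * l.length) := by
  induction l generalizing acc c with
  | nil => simp
  | cons x xs ih => simp [List.foldl, ih]; omega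

theorem generate_worst_case_array_spec : Claim_equal_generate_worst_case_array := by
  intro size _
  unfold Spec_generate_worst_case_array generate_worst_case_array generate_worst_case_array_alt
  rw [gwca_foldl]
  simp
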